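-- pv_equiv track=rewrite | github.com/vacilyok/Simple-Flask | app.py | animal_say
-- ===== SOURCE A (Python) =====
-- def animal_say(animal, sound, count, method):
--     say_phrase = ""
--     for i in range(int(count)):
--         if method == 'POST':
--             say_phrase = say_phrase + str("{} says {} \n".format(animal, sound))
--         else:
--             say_phrase = say_phrase + str("<p style='font-size:12pt'><b>{}</b> says {} </p>".format(animal, sound))
--
--     if method == 'POST':
--         say_phrase = say_phrase + "Made with by vacilyok \n"
--     else:
--         say_phrase = say_phrase + "<p style='font-size:12pt'>Made with by <a href='https://github.com/vacilyok'>vacilyok</a></p>"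
--
--     return say_phrase
-- ===== SOURCE B (Python) =====
-- def animal_say(animal, sound, count, method):
--     if method == 'POST':
--         body = "{} says {} \n".format(animal, sound)
--         footer = "Made with by vacilyok \n"
--     else:
--         body = "<p style='font-size:12pt'><b>{}</b> says {} </p>".format(animal, sound)
--         footer = "<p style='font-size:12pt'>Made with by <a href='https://github.com/vacilyok'>vacilyok</a></p>"
--     return body * int(count) + footer
-- ===== Notes on version B (the rewrite author's own statement) =====
-- stated objective: simpler
-- what changed: Branch on method once to pick the body template and footer, then build the repeated part with closed-form string replication body * int(count) instead of A's per-iteration branch-and-concatenate loop.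
import Mathlib
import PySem

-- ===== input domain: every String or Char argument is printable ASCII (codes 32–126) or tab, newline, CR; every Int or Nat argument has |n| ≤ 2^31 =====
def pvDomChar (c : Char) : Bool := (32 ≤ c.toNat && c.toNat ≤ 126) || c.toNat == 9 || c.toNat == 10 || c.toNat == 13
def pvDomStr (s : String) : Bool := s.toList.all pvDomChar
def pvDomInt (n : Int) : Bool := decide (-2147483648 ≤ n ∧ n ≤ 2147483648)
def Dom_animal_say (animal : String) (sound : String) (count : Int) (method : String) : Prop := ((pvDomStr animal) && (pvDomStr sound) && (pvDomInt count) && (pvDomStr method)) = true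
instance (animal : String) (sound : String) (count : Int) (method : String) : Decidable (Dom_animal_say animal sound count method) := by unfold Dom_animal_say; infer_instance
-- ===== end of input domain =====

-- B replaces A's per-iteration branch-and-concatenate loop by one branch on `method`
-- selecting body and footer, plus closed-form string replication (objective: simpler).

-- ===== PORT A =====
def animal_say (animal : String) (sound : String) (count : Int) (method : String) : String :=
  let say_phrase := (PySem.List.pyRange 0 count 1).foldl (fun acc _ =>
    if method == "POST" then
      acc ++ (animal ++ " says " ++ sound ++ " \n")
    else
      acc ++ ("<p style='font-size:12pt'><b>" ++ animal ++ "</b> says " ++ sound ++ " </p>")) ""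
  if method == "POST" then
    say_phrase ++ "Made with by vacilyok \n"
  else
    say_phrase ++ "<p style='font-size:12pt'>Made with by <a href='https://github.com/vacilyok'>vacilyok</a></p>"

-- ===== PORT B =====
-- `s * n` string replication (empty for n ≤ 0), as in Source B's `body * int(count)`
def strRepeatN (s : String) : Nat → String
  | 0 => ""
  | n + 1 => s ++ strRepeatN s n

def strRepeat (s : String) (n : Int) : String := strRepeatN s n.toNat

def animal_say_alt (animal : String) (sound : String) (count : Int) (method : String) : String :=
  let bf :=
    if method == "POST" then
      (animal ++ " says " ++ sound ++ " \n", "Made with by vacilyok \n")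
    else
      ("<p style='font-size:12pt'><b>" ++ animal ++ "</b> says " ++ sound ++ " </p>",
       "<p style='font-size:12pt'>Made with by <a href='https://github.com/vacilyok'>vacilyok</a></p>")
  strRepeat bf.1 count ++ bf.2

-- ===== PRECONDITION & SPEC =====
def Spec_animal_say (animal : String) (sound : String) (count : Int) (method : String) (out : String) : Prop := out = animal_say_alt animal sound count method
instance (animal : String) (sound : String) (count : Int) (method : String) (out : String) : Decidable (Spec_animal_say animal sound count method out) := by unfold Spec_animal_say; infer_instance

-- ===== CLAIM (what is proved, stated in full; the proofs are below) =====
def Claim_equal_animal_say : Prop := ∀ (animal : String) (sound : String) (count : Int) (method : String), Dom_animal_say animal sound count method → Spec_animal_say animal sound count method (animal_say animal sound count method)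

-- ===== LEMMAS AND PROOFS =====
theorem foldl_const_append {α : Type} (b : String) :
    ∀ (l : List α) (acc : String), l.foldl (fun a _ => a ++ b) acc = acc ++ strRepeatN b l.length
  | [], acc => String.append_empty.symm
  | _ :: l, acc => by
    simp only [List.foldl, List.length_cons]
    rw [foldl_const_append b l (acc ++ b), String.append_assoc]
    rfl

theorem animal_say_eq_alt (animal sound : String) (count : Int) (method : String) :
    animal_say animal sound count method = animal_say_alt animal sound count method := by
  unfold animal_say animal_say_alt strRepeat
  by_cases h : (method == "POST") = true <;>
    simp [h, foldl_const_append, PySem.List.length_pyRange_one, String.empty_append]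

-- ===== VERDICT (by name: the statement is the Claim_ definition above) =====
theorem animal_say_spec : Claim_equal_animal_say := by
  intro animal sound count method _
  unfold Spec_animal_say
  exact animal_say_eq_alt animal sound count method
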